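-- pv_equiv track=rewrite | github.com/NagyIlona4918/Python_progs | 7. alkalom/gyak_3.py | course_code_grouping
-- ===== SOURCE A (Python) =====
-- def course_code_grouping(text):
--     if text == "":
--         return {}
--
--     courses = text.split(';')
--     groups = {'infos': [], 'matekos': [], 'szabval': []}
--
--     for code in courses:
--         if code.startswith('I'):
--             groups['infos'].append(code)
--         elif code.startswith('M'):
--             groups['matekos'].append(code)
--         elif code.startswith('X'):
--             groups['szabval'].append(code)
--
--     return groups
-- ===== SOURCE B (Python) =====
-- # B: recursive back-to-front grouping -- locates each separator via str.find, recurses on the remainder,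
-- # and prepends each code to the right component of a triple; no split(), no intermediate
-- # list of courses, no dict mutation (alternative decomposition, same cost).
-- def _collect(s):
--     i = s.find(';')
--     if i == -1:
--         infos, matekos, szabval = [], [], []
--         code = s
--     else:
--         infos, matekos, szabval = _collect(s[i + 1:])
--         code = s[:i]
--     if code.startswith('I'):
--         infos = [code] + infos
--     elif code.startswith('M'):
--         matekos = [code] + matekos
--     elif code.startswith('X'):
--         szabval = [code] + szabval
--     return infos, matekos, szabval
--
-- def course_code_grouping(text):
--     if text == "":
--         return {}
--     infos, matekos, szabval = _collect(text)
--     return {'infos': infos, 'matekos': matekos, 'szabval': szabval}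
-- ===== Notes on version B (the rewrite author's own statement) =====
-- stated objective: alternative
-- what changed: Replaces A's split-then-categorize pass that mutates a pre-built dict with a recursive helper that locates each separator itself via str.find, recurses on the remainder and prepends each code back-to-front onto a triple of lists; no split(), no intermediate course list, no dict mutation.
import Mathlib
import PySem

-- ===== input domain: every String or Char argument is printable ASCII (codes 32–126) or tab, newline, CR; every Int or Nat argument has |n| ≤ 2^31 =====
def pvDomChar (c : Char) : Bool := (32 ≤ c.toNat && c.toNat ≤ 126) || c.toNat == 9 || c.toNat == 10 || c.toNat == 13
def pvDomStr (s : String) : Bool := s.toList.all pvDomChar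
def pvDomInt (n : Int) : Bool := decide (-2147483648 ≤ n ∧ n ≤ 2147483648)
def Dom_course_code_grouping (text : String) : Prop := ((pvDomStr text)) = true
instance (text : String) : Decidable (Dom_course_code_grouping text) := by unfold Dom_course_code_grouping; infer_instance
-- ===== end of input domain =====

-- B replaces A's split-then-categorize dict-mutating pass with a recursive helper that locates
-- each separator itself via find, recurses on the remainder and prepends codes back-to-front onto
-- a triple of lists (alternative decomposition, same cost).
-- ===== PORT A =====
def course_code_grouping (text : String) : List (String × List String) :=
  if text = "" then []
  else
    let courses := (PySem.Str.split? text ";").getD []   -- sep ";" ≠ "", so split? is always some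
    let groups : PySem.Dict String (List String) :=
      PySem.Dict.ofList [("infos", []), ("matekos", []), ("szabval", [])]
    let groups := courses.foldl (fun g code =>
      if PySem.Str.startswith code "I" then g.modify "infos" [] (· ++ [code])
      else if PySem.Str.startswith code "M" then g.modify "matekos" [] (· ++ [code])
      else if PySem.Str.startswith code "X" then g.modify "szabval" [] (· ++ [code])
      else g) groups
    groups.items

-- ===== PORT B =====
-- _collect, on the string's characters (PySem.Str.find / slice / startswith are thin
-- wrappers over these Chars/List operations)
def pvCollect (s : List Char) : List String × List String × List String :=
  let i := PySem.Chars.find s [';']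
  if h : i = -1 then
    let code := s
    if PySem.Chars.startswith code ['I'] then (String.ofList code :: [], [], [])
    else if PySem.Chars.startswith code ['M'] then ([], String.ofList code :: [], [])
    else if PySem.Chars.startswith code ['X'] then ([], [], String.ofList code :: [])
    else ([], [], [])
  else
    let r := pvCollect (PySem.List.slice s (some (i + 1)) none)
    let code := PySem.List.slice s none (some i)
    let infos := r.1
    let matekos := r.2.1
    let szabval := r.2.2
    if PySem.Chars.startswith code ['I'] then (String.ofList code :: infos, matekos, szabval)
    else if PySem.Chars.startswith code ['M'] then (infos, String.ofList code :: matekos, szabval)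
    else if PySem.Chars.startswith code ['X'] then (infos, matekos, String.ofList code :: szabval)
    else (infos, matekos, szabval)
termination_by s.length
decreasing_by
  have h0 : (0:Int) ≤ i := by
    have := PySem.Chars.neg_one_le_find s [';']
    omega
  have hs : s ≠ [] := by
    intro he
    subst he
    have : [';'] <:+: ([] : List Char) := (PySem.Chars.find_ne_neg_one_iff _ _).mp h
    simp at this
  rw [PySem.List.slice_from s (by omega : (0:Int) ≤ i + 1)]
  have h1 : 1 ≤ (i + 1).toNat := by omega
  have h2 : 0 < s.length := List.length_pos_iff.mpr hs
  simp only [List.length_drop]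
  omega

def course_code_grouping_alt (text : String) : List (String × List String) :=
  if text = "" then []
  else
    let r := pvCollect text.toList
    [("infos", r.1), ("matekos", r.2.1), ("szabval", r.2.2)]

-- ===== PRECONDITION & SPEC =====
def Spec_course_code_grouping (text : String) (out : List (String × List String)) : Prop := out = course_code_grouping_alt text
instance (text : String) (out : List (String × List String)) : Decidable (Spec_course_code_grouping text out) := by unfold Spec_course_code_grouping; infer_instance

-- ===== CLAIM (what is proved, stated in full; the proofs are below) =====
def Claim_equal_course_code_grouping : Prop := ∀ (text : String), Dom_course_code_grouping text → Spec_course_code_grouping text (course_code_grouping text)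

-- ===== LEMMAS AND PROOFS =====

-- a one-character prefix determines the head: two distinct one-character prefixes are exclusive
theorem singleton_prefix_exclusive {l : List Char} {x y : Char} (hxy : x ≠ y)
    (hx : [x] <+: l) : ¬ [y] <+: l := by
  intro hy
  cases l with
  | nil => simp at hx
  | cons h t =>
    rw [List.cons_prefix_cons] at hx hy
    exact hxy (hx.1.trans hy.1.symm)

theorem startswith_char_exclusive {s : List Char} {x y : Char} (hxy : x ≠ y)
    (h : PySem.Chars.startswith s [x] = true) : PySem.Chars.startswith s [y] = false := by
  rw [PySem.Chars.startswith_iff] at h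
  rw [← Bool.not_eq_true, PySem.Chars.startswith_iff]
  exact singleton_prefix_exclusive hxy h

-- the dict state keeps its literal three-key shape; modify just rewrites one slot
theorem modify_infos (a b c : List String) (f : List String → List String) :
    (PySem.Dict.mk [("infos", a), ("matekos", b), ("szabval", c)]).modify "infos" [] f
    = PySem.Dict.mk [("infos", f a), ("matekos", b), ("szabval", c)] := by
  simp [PySem.Dict.modify, PySem.Dict.insert, PySem.Dict.getD, PySem.Dict.get?]

theorem modify_matekos (a b c : List String) (f : List String → List String) :
    (PySem.Dict.mk [("infos", a), ("matekos", b), ("szabval", c)]).modify "matekos" [] f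
    = PySem.Dict.mk [("infos", a), ("matekos", f b), ("szabval", c)] := by
  simp [PySem.Dict.modify, PySem.Dict.insert, PySem.Dict.getD, PySem.Dict.get?]

theorem modify_szabval (a b c : List String) (f : List String → List String) :
    (PySem.Dict.mk [("infos", a), ("matekos", b), ("szabval", c)]).modify "szabval" [] f
    = PySem.Dict.mk [("infos", a), ("matekos", b), ("szabval", f c)] := by
  simp [PySem.Dict.modify, PySem.Dict.insert, PySem.Dict.getD, PySem.Dict.get?]

-- loop invariant: A's fold over any tail appends that tail's three filters to the accumulators
theorem fold_items (courses : List String) (a b c : List String) :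
    (courses.foldl (fun g code =>
      if PySem.Str.startswith code "I" then g.modify "infos" [] (· ++ [code])
      else if PySem.Str.startswith code "M" then g.modify "matekos" [] (· ++ [code])
      else if PySem.Str.startswith code "X" then g.modify "szabval" [] (· ++ [code])
      else g) (PySem.Dict.mk [("infos", a), ("matekos", b), ("szabval", c)])).items
    = [("infos", a ++ courses.filter (fun s => PySem.Str.startswith s "I")),
       ("matekos", b ++ courses.filter (fun s => PySem.Str.startswith s "M")),
       ("szabval", c ++ courses.filter (fun s => PySem.Str.startswith s "X"))] := by
  induction courses generalizing a b c with
  | nil => simp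
  | cons x xs ih =>
    simp only [List.foldl_cons]
    by_cases hI : PySem.Str.startswith x "I" = true
    · have hI' : PySem.Chars.startswith x.toList ['I'] = true := by simpa using hI
      have hM : PySem.Str.startswith x "M" = false := by
        simpa using startswith_char_exclusive (by decide : ('I':Char) ≠ 'M') hI'
      have hX : PySem.Str.startswith x "X" = false := by
        simpa using startswith_char_exclusive (by decide : ('I':Char) ≠ 'X') hI'
      rw [if_pos hI, modify_infos, ih]
      simp only [List.filter_cons, hI, hM, hX]
      simp
    · by_cases hM : PySem.Str.startswith x "M" = true
      · have hM' : PySem.Chars.startswith x.toList ['M'] = true := by simpa using hM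
        have hX : PySem.Str.startswith x "X" = false := by
          simpa using startswith_char_exclusive (by decide : ('M':Char) ≠ 'X') hM'
        rw [if_neg hI, if_pos hM, modify_matekos, ih]
        simp only [List.filter_cons, eq_false_of_ne_true hI, hM, hX]
        simp
      · by_cases hX : PySem.Str.startswith x "X" = true
        · rw [if_neg hI, if_neg hM, if_pos hX, modify_szabval, ih]
          simp only [List.filter_cons, eq_false_of_ne_true hI, eq_false_of_ne_true hM, hX]
          simp
        · rw [if_neg hI, if_neg hM, if_neg hX, ih]
          simp only [List.filter_cons, eq_false_of_ne_true hI, eq_false_of_ne_true hM,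
            eq_false_of_ne_true hX]
          simp

-- reference single-character splitter
def splitChar (c : Char) : List Char → List (List Char)
  | [] => [[]]
  | x :: xs =>
    if x = c then [] :: splitChar c xs
    else
      match splitChar c xs with
      | h :: t => (x :: h) :: t
      | [] => [[x]]

theorem splitChar_ne_nil (c : Char) (l : List Char) : splitChar c l ≠ [] := by
  cases l with
  | nil => simp [splitChar]
  | cons x xs =>
    simp only [splitChar]
    split
    · simp
    · split <;> simp_all

theorem modifyHead_triv {α : Type} (l : List α) : l.modifyHead (fun x => x) = l := by
  cases l <;> rfl

-- splitOn with a one-character separator is splitChar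
theorem splitOn_go_eq (c : Char) (fuel : Nat) :
    ∀ (l cur : List Char) (acc : List (List Char)), l.length < fuel →
    PySem.Chars.splitOn.go [c] fuel l cur acc
      = acc.reverse ++ (splitChar c l).modifyHead (cur.reverse ++ ·) := by
  induction fuel with
  | zero => intro l cur acc h; omega
  | succ fuel ih =>
    intro l cur acc h
    cases l with
    | nil => simp [PySem.Chars.splitOn.go, splitChar]
    | cons x xs =>
      rw [PySem.Chars.splitOn.go]
      by_cases hx : x = c
      · subst hx
        rw [if_pos (by simp)]
        rw [ih _ _ _ (by simpa using Nat.lt_of_succ_lt_succ h)]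
        simp [splitChar, modifyHead_triv]
      · rw [if_neg (by simp [List.isPrefixOf]; intro hc; exact hx hc.symm)]
        rw [ih _ _ _ (by simpa using Nat.lt_of_succ_lt_succ h)]
        simp only [splitChar, if_neg hx]
        rcases hsp : splitChar c xs with _ | ⟨hd, tl⟩
        · exact absurd hsp (splitChar_ne_nil c xs)
        · simp

theorem splitOn_eq_splitChar (c : Char) (s : List Char) :
    PySem.Chars.splitOn s [c] = splitChar c s := by
  rw [PySem.Chars.splitOn, splitOn_go_eq c _ _ _ _ (by omega)]
  simp [modifyHead_triv]

-- splitChar on a list without the separator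
theorem splitChar_no_sep {c : Char} {l : List Char} (h : c ∉ l) : splitChar c l = [l] := by
  induction l with
  | nil => simp [splitChar]
  | cons x xs ih =>
    simp only [List.mem_cons, not_or] at h
    have hx : ¬ x = c := fun he => h.1 he.symm
    simp [splitChar, hx, ih h.2]

-- splitChar splits off the first separator occurrence
theorem splitChar_append {c : Char} {a : List Char} (b : List Char) (h : c ∉ a) :
    splitChar c (a ++ c :: b) = a :: splitChar c b := by
  induction a with
  | nil => simp [splitChar]
  | cons x xs ih =>
    simp only [List.mem_cons, not_or] at h
    have hx : ¬ x = c := fun he => h.1 he.symm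
    simp only [List.cons_append, splitChar, if_neg hx, ih h.2]

-- B's recursion computes, back-to-front, exactly the three filters over splitChar
theorem pvCollect_eq (s : List Char) :
    pvCollect s =
      ((((splitChar ';' s).filter (fun cs => PySem.Chars.startswith cs ['I'])).map String.ofList),
       (((splitChar ';' s).filter (fun cs => PySem.Chars.startswith cs ['M'])).map String.ofList),
       (((splitChar ';' s).filter (fun cs => PySem.Chars.startswith cs ['X'])).map String.ofList)) := by
  rw [pvCollect]
  by_cases h : PySem.Chars.find s [';'] = -1
  · rw [dif_pos h]
    have hno : (';' : Char) ∉ s := by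
      intro hm
      have : [';'] <:+: s := by
        obtain ⟨a, b, rfl⟩ := List.append_of_mem hm
        exact ⟨a, b, by simp⟩
      exact (PySem.Chars.find_eq_neg_one_iff s [';']).mp h this
    rw [splitChar_no_sep hno]
    by_cases hI : PySem.Chars.startswith s ['I'] = true
    · have hM := startswith_char_exclusive (by decide : ('I':Char) ≠ 'M') hI
      have hX := startswith_char_exclusive (by decide : ('I':Char) ≠ 'X') hI
      simp [hI, hM, hX]
    · by_cases hM : PySem.Chars.startswith s ['M'] = true
      · have hX := startswith_char_exclusive (by decide : ('M':Char) ≠ 'X') hM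
        simp [hI, hM, hX]
      · by_cases hX : PySem.Chars.startswith s ['X'] = true
        · simp [hI, hM, hX]
        · simp [hI, hM, hX]
  · rw [dif_neg h]
    have h0 : (0:Int) ≤ PySem.Chars.find s [';'] := by
      have := PySem.Chars.neg_one_le_find s [';']
      omega
    obtain ⟨hpre, hmin⟩ := PySem.Chars.find_spec (s := s) (sub := [';']) h0
    set i := PySem.Chars.find s [';'] with hi
    have hlen : i.toNat < s.length := by
      rcases Nat.lt_or_ge i.toNat s.length with hlt | hge
      · exact hlt
      · exfalso
        rw [List.drop_eq_nil_of_le hge] at hpre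
        simp at hpre
    have hget : s[i.toNat] = ';' := by
      obtain ⟨t, ht⟩ := hpre
      rw [List.drop_eq_getElem_cons hlen] at ht
      exact ((List.cons_eq_cons.mp ht).1).symm
    have hdrop : s.drop i.toNat = ';' :: s.drop (i.toNat + 1) := by
      rw [List.drop_eq_getElem_cons hlen, hget]
    have hnot : (';' : Char) ∉ s.take i.toNat := by
      intro hm
      obtain ⟨j, hj, hjv⟩ := List.mem_iff_getElem.mp hm
      have hjlt : j < i.toNat := by
        have := hj
        simp [List.length_take] at this
        omega
      have hjlen : j < s.length := by omega
      apply hmin j hjlt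
      rw [List.drop_eq_getElem_cons hjlen]
      refine ⟨s.drop (j + 1), ?_⟩
      have : s[j] = ';' := by
        rw [← hjv]
        simp [List.getElem_take]
      simp [this]
    have hsplit : splitChar ';' s = s.take i.toNat :: splitChar ';' (s.drop (i.toNat + 1)) := by
      conv_lhs => rw [← List.take_append_drop i.toNat s, hdrop]
      exact splitChar_append _ hnot
    have htoNat : (i + 1).toNat = i.toNat + 1 := by omega
    rw [PySem.List.slice_from s (by omega : (0:Int) ≤ i + 1),
        PySem.List.slice_to s h0, htoNat,
        pvCollect_eq (s.drop (i.toNat + 1)), hsplit]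
    set code := s.take i.toNat
    by_cases hI : PySem.Chars.startswith code ['I'] = true
    · have hM := startswith_char_exclusive (by decide : ('I':Char) ≠ 'M') hI
      have hX := startswith_char_exclusive (by decide : ('I':Char) ≠ 'X') hI
      simp [hI, hM, hX]
    · by_cases hM : PySem.Chars.startswith code ['M'] = true
      · have hX := startswith_char_exclusive (by decide : ('M':Char) ≠ 'X') hM
        simp [hI, hM, hX]
      · by_cases hX : PySem.Chars.startswith code ['X'] = true
        · simp [hI, hM, hX]
        · simp [hI, hM, hX]
termination_by s.length
decreasing_by
  simp only [List.length_drop]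
  omega

-- A = B pointwise
theorem course_code_grouping_eq (text : String) :
    course_code_grouping text = course_code_grouping_alt text := by
  unfold course_code_grouping course_code_grouping_alt
  by_cases h : text = ""
  · simp [h]
  · simp only [if_neg h]
    have hsplit : (PySem.Str.split? text ";").getD []
        = (splitChar ';' text.toList).map String.ofList := by
      simp [PySem.Str.split?, PySem.Chars.split?, splitOn_eq_splitChar]
    rw [hsplit]
    have hd : PySem.Dict.ofList [("infos", ([] : List String)), ("matekos", []), ("szabval", [])]
        = PySem.Dict.mk [("infos", []), ("matekos", []), ("szabval", [])] := by rfl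
    rw [hd, fold_items _ [] [] []]
    rw [pvCollect_eq]
    have hfil : ∀ (x : Char),
        ((splitChar ';' text.toList).map String.ofList).filter
            (fun s => PySem.Str.startswith s (String.ofList [x]))
        = (((splitChar ';' text.toList).filter
            (fun cs => PySem.Chars.startswith cs [x])).map String.ofList) := by
      intro x
      rw [List.filter_map]
      congr 1
      apply List.filter_congr
      intro cs _
      simp [PySem.Str.startswith_eq, String.toList_ofList]
    simp only [List.nil_append]
    rw [show ("I" : String) = String.ofList ['I'] from rfl,
        show ("M" : String) = String.ofList ['M'] from rfl,
        show ("X" : String) = String.ofList ['X'] from rfl,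
        hfil 'I', hfil 'M', hfil 'X']

-- ===== VERDICT (by name: the statement is the Claim_ definition above) =====
theorem course_code_grouping_spec : Claim_equal_course_code_grouping := by
  intro text _
  unfold Spec_course_code_grouping
  exact course_code_grouping_eq text
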